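-- pv_equiv track=rewrite | github.com/JorisSTG/carte_stationsMF | FRANCE/telechargement.py | sanitize_station_name
-- ===== SOURCE A (Python) =====
-- def sanitize_station_name(name: str) -> str:
--     name = str(name).upper()
--     for c in ["/", "\\", " ", "\t"]:
--         name = name.replace(c, "_")
--     name = "".join(c for c in name if c.isalnum() or c == "_")
--     while "__" in name:
--         name = name.replace("__", "_")
--     return name.strip("_")
-- ===== SOURCE B (Python) =====
-- def sanitize_station_name(name: str) -> str:
--     s = str(name).upper()
--     tokens = []
--     cur = []
--     for c in s:
--         if c.isalnum():
--             cur.append(c)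
--         elif c in {"/", "\\", " ", "\t", "_"}:
--             if cur:
--                 tokens.append("".join(cur))
--                 cur = []
--         # any other character is deleted and does not end the current token
--     if cur:
--         tokens.append("".join(cur))
--     return "_".join(tokens)
-- ===== Notes on version B (the rewrite author's own statement) =====
-- stated objective: alternative
-- what changed: Replaces A's five rewrite passes (four replace passes, a filter pass, a repeated '__'-collapsing while loop, and a final strip) by a single left-to-right pass that classifies each character (alnum: extend current token, separator: flush token, other: delete) and joins the collected tokens with '_'.
import Mathlib
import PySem

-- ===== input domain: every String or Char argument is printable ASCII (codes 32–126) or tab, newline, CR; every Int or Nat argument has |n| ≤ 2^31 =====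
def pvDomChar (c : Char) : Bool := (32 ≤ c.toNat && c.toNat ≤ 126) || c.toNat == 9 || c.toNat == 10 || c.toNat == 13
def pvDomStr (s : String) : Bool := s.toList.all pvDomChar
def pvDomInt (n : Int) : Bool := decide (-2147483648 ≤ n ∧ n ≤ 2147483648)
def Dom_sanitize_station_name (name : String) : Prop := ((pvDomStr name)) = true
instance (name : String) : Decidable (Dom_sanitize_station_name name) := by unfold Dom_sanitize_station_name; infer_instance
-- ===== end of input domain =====

-- B replaces A's five rewrite passes (four replaces, a filter, a repeated '__'-collapsing
-- while loop, a strip) by one classifying pass that collects tokens and joins them with '_'.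

-- one pass of name.replace("__", "_") (needed by Port A's while-loop termination proof)
def pvR1 : List Char → List Char
  | [] => []
  | [c] => [c]
  | a :: b :: t => if a = '_' ∧ b = '_' then '_' :: pvR1 t else a :: pvR1 (b :: t)

theorem pvR1_length_le : ∀ cs : List Char, (pvR1 cs).length ≤ cs.length
  | [] => by simp [pvR1]
  | [c] => by simp [pvR1]
  | a :: b :: t => by
    have h1 := pvR1_length_le t
    have h2 := pvR1_length_le (b :: t)
    simp only [pvR1]
    split
    · simp only [List.length_cons]; omega
    · simp only [List.length_cons] at h2 ⊢; omega

theorem pvGo_underscore : ∀ (fuel : Nat) (l acc : List Char), l.length ≤ fuel →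
    PySem.Chars.replace.go ['_', '_'] ['_'] fuel l acc = acc.reverse ++ pvR1 l := by
  intro fuel
  induction fuel with
  | zero =>
    intro l acc h
    have hl : l = [] := by cases l <;> simp_all
    subst hl
    rw [PySem.Chars.replace.go.eq_def]
    simp [pvR1]
  | succ n ih =>
    intro l acc h
    match l with
    | [] => rw [PySem.Chars.replace.go.eq_def]; simp [pvR1]
    | [c] =>
      have hpre : (['_', '_'] : List Char).isPrefixOf [c] = false := by
        simp [List.isPrefixOf]
      rw [PySem.Chars.replace.go.eq_def]
      simp only [hpre, Bool.false_eq_true, if_false]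
      rw [ih [] (c :: acc) (by simp)]
      simp [pvR1]
    | a :: b :: t =>
      by_cases hab : a = '_' ∧ b = '_'
      · obtain ⟨ha, hb⟩ := hab
        subst ha; subst hb
        have hpre : (['_', '_'] : List Char).isPrefixOf ('_' :: '_' :: t) = true := by
          simp [List.isPrefixOf]
        rw [PySem.Chars.replace.go.eq_def]
        simp only [hpre, if_true]
        rw [show List.drop (['_', '_'] : List Char).length ('_' :: '_' :: t) = t from rfl]
        rw [show (['_'] : List Char).reverse ++ acc = '_' :: acc from rfl]
        rw [ih t ('_' :: acc) (by simp at h ⊢; omega)]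
        simp [pvR1]
      · have hpre : (['_', '_'] : List Char).isPrefixOf (a :: b :: t) = false := by
          rcases (not_and_or.mp hab) with h' | h'
          · simp [List.isPrefixOf]
            intro he; exact absurd he.symm h'
          · simp [List.isPrefixOf]
            intro _ he; exact absurd he.symm h'
        rw [PySem.Chars.replace.go.eq_def]
        simp only [hpre, Bool.false_eq_true, if_false]
        rw [ih (b :: t) (a :: acc) (by simp at h ⊢; omega)]
        simp only [pvR1, if_neg hab]
        simp

theorem pvReplace_underscore (cs : List Char) :
    PySem.Chars.replace cs ['_', '_'] ['_'] = pvR1 cs := by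
  rw [PySem.Chars.replace]
  simp only [List.isEmpty_cons, Bool.false_eq_true, if_false]
  rw [pvGo_underscore cs.length cs [] le_rfl]
  simp

theorem pvInfix_r1_lt : ∀ cs : List Char, ['_', '_'] <:+: cs → (pvR1 cs).length < cs.length
  | [], h => by have := h.length_le; simp at this
  | [c], h => by have := h.length_le; simp at this
  | a :: b :: t, h => by
    by_cases hab : a = '_' ∧ b = '_'
    · have := pvR1_length_le t
      simp only [pvR1, if_pos hab]
      simp only [List.length_cons]; omega
    · have ht : ['_', '_'] <:+: (b :: t) := by
        obtain ⟨p, q, hpq⟩ := h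
        cases p with
        | nil =>
          simp only [List.nil_append, List.cons_append, List.cons.injEq] at hpq
          exact absurd ⟨hpq.1.symm, hpq.2.1.symm⟩ hab
        | cons x p' =>
          simp only [List.cons_append] at hpq
          injection hpq with _ h2
          exact ⟨p', q, h2⟩
      have := pvInfix_r1_lt (b :: t) ht
      simp only [pvR1, if_neg hab]
      simp only [List.length_cons] at this ⊢; omega

theorem pvIsIn_underscore (cs : List Char) :
    PySem.Chars.isIn ['_', '_'] cs = true ↔ ['_', '_'] <:+: cs := by
  have h := PySem.Chars.findFrom_natCast_eq_neg_one_iff cs ['_', '_'] 0 (by simp)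
  rw [Nat.cast_zero, PySem.Chars.findFrom_zero, List.drop_zero] at h
  simp only [PySem.Chars.isIn, bne_iff_ne, ne_eq]
  constructor
  · intro hne; by_contra hinf; exact hne (h.mpr hinf)
  · intro hinf hne; exact (h.mp hne) hinf

-- ===== PORT A =====
-- while "__" in name: name = name.replace("__", "_")
def pvALoop (cs : List Char) : List Char :=
  if PySem.Chars.isIn ['_', '_'] cs then pvALoop (PySem.Chars.replace cs ['_', '_'] ['_']) else cs
termination_by cs.length
decreasing_by
  rename_i h
  rw [pvReplace_underscore]
  exact pvInfix_r1_lt _ ((pvIsIn_underscore _).mp h)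

def sanitize_station_name (name : String) : String :=
  let n1 := PySem.Str.upper name
  let n2 := ["/", "\\", " ", "\t"].foldl (fun s c => PySem.Str.replace s c "_") n1
  let n3 := String.ofList (n2.toList.filter (fun c => PySem.Chars.isalnum c || c == '_'))
  let n4 := String.ofList (pvALoop n3.toList)
  PySem.Str.stripChars n4 "_"

-- ===== PORT B =====
def sanitize_station_name_alt (name : String) : String :=
  let s := PySem.Str.upper name
  let r := s.toList.foldl (fun (st : List (List Char) × List Char) (c : Char) =>
    if PySem.Chars.isalnum c then (st.1, st.2 ++ [c])
    else if ['/', '\\', ' ', '\t', '_'].contains c then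
      (if st.2 = [] then st else (st.1 ++ [st.2], ([] : List Char)))
    else st) ([], [])
  let tokens := if r.2 = [] then r.1 else r.1 ++ [r.2]
  String.ofList (PySem.Chars.join ['_'] tokens)

-- ===== PRECONDITION & SPEC =====
def Spec_sanitize_station_name (name : String) (out : String) : Prop := out = sanitize_station_name_alt name
instance (name : String) (out : String) : Decidable (Spec_sanitize_station_name name out) := by unfold Spec_sanitize_station_name; infer_instance

-- ===== CLAIM (what is proved, stated in full; the proofs are below) =====
def Claim_equal_sanitize_station_name : Prop := ∀ (name : String), Dom_sanitize_station_name name → Spec_sanitize_station_name name (sanitize_station_name name)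

-- ===== LEMMAS AND PROOFS =====

theorem pvR1_head : ∀ (a : Char) (t : List Char), ∃ Y, pvR1 (a :: t) = a :: Y := by
  intro a t
  match t with
  | [] => exact ⟨[], by simp [pvR1]⟩
  | b :: t' =>
    by_cases hab : a = '_' ∧ b = '_'
    · exact ⟨pvR1 t', by simp only [pvR1, if_pos hab]; rw [hab.1]⟩
    · exact ⟨pvR1 (b :: t'), by simp [pvR1, hab]⟩

-- collapse every run of '_' to a single '_' (the fixpoint of A's while loop)
def pvSqueeze : List Char → List Char
  | [] => []
  | [a] => [a]
  | a :: b :: t => if a = '_' ∧ b = '_' then pvSqueeze (b :: t) else a :: pvSqueeze (b :: t)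

-- maximal runs of non-'_' characters, with an explicit current-run accumulator
def pvWords : List Char → List Char → List (List Char)
  | cur, [] => if cur = [] then [] else [cur]
  | cur, c :: t =>
    if c = '_' then (if cur = [] then pvWords [] t else cur :: pvWords [] t)
    else pvWords (cur ++ [c]) t

-- B's token collection, as a recursion over the remaining input
def pvToks : List Char → List Char → List (List Char)
  | cur, [] => if cur = [] then [] else [cur]
  | cur, c :: t =>
    if PySem.Chars.isalnum c then pvToks (cur ++ [c]) t
    else if ['/', '\\', ' ', '\t', '_'].contains c then
      (if cur = [] then pvToks [] t else cur :: pvToks [] t)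
    else pvToks cur t

-- B's fold step, named (definitionally equal to the lambda in the port)
def pvStep (st : List (List Char) × List Char) (c : Char) : List (List Char) × List Char :=
  if PySem.Chars.isalnum c then (st.1, st.2 ++ [c])
  else if ['/', '\\', ' ', '\t', '_'].contains c then
    (if st.2 = [] then st else (st.1 ++ [st.2], ([] : List Char)))
  else st

def pvFin (r : List (List Char) × List Char) : List (List Char) :=
  if r.2 = [] then r.1 else r.1 ++ [r.2]

def pvG (c0 : Char) (x : Char) : Char := if x = c0 then '_' else x
def pvF4 (x : Char) : Char := if x = '/' ∨ x = '\\' ∨ x = ' ' ∨ x = '\t' then '_' else x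
def pvKeep (c : Char) : Bool := PySem.Chars.isalnum c || c == '_'
def pvMid (u : List Char) : List Char := (u.map pvF4).filter pvKeep
def pvRst (cs : List Char) : List Char := (cs.reverse.dropWhile (['_'].contains ·)).reverse

theorem pvGo_single : ∀ (fuel : Nat) (l acc : List Char) (c0 : Char), l.length ≤ fuel →
    PySem.Chars.replace.go [c0] ['_'] fuel l acc = acc.reverse ++ l.map (pvG c0) := by
  intro fuel
  induction fuel with
  | zero =>
    intro l acc c0 h
    have hl : l = [] := by cases l <;> simp_all
    subst hl
    rw [PySem.Chars.replace.go.eq_def]; simp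
  | succ n ih =>
    intro l acc c0 h
    match l with
    | [] => rw [PySem.Chars.replace.go.eq_def]; simp
    | c :: t =>
      by_cases hc : c = c0
      · subst hc
        have hpre : ([c] : List Char).isPrefixOf (c :: t) = true := by simp [List.isPrefixOf]
        rw [PySem.Chars.replace.go.eq_def]
        simp only [hpre, if_true]
        rw [show List.drop ([c] : List Char).length (c :: t) = t from rfl]
        rw [show (['_'] : List Char).reverse ++ acc = '_' :: acc from rfl]
        rw [ih t ('_' :: acc) c (by simp at h; omega)]
        simp [pvG]
      · have hpre : ([c0] : List Char).isPrefixOf (c :: t) = false := by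
          simp [List.isPrefixOf, beq_eq_false_iff_ne]
          exact fun he => hc he.symm
        rw [PySem.Chars.replace.go.eq_def]
        simp only [hpre, Bool.false_eq_true, if_false]
        rw [ih t (c :: acc) c0 (by simp at h; omega)]
        simp [pvG, hc]

theorem pvReplace_single (cs : List Char) (c0 : Char) :
    PySem.Chars.replace cs [c0] ['_'] = cs.map (pvG c0) := by
  rw [PySem.Chars.replace]
  simp only [List.isEmpty_cons, Bool.false_eq_true, if_false]
  rw [pvGo_single cs.length cs [] c0 le_rfl]
  simp

theorem pvFoldB : ∀ (t : List Char) (ts : List (List Char)) (cur : List Char),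
    pvFin (t.foldl pvStep (ts, cur)) = ts ++ pvToks cur t := by
  intro t
  induction t with
  | nil =>
    intro ts cur
    simp only [List.foldl_nil, pvFin, pvToks]
    by_cases hcur : cur = [] <;> simp [hcur]
  | cons c t ih =>
    intro ts cur
    simp only [List.foldl_cons, pvToks, pvStep]
    by_cases h1 : PySem.Chars.isalnum c = true
    · simp only [h1, if_true]; exact ih ts (cur ++ [c])
    · simp only [h1, Bool.false_eq_true, if_false]
      by_cases h2 : (['/', '\\', ' ', '\t', '_'] : List Char).contains c = true
      · simp only [h2, if_true]
        by_cases h3 : cur = []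
        · simp only [h3, if_true]; exact ih ts []
        · simp only [if_neg h3]
          rw [ih (ts ++ [cur]) []]
          simp
      · simp only [h2, Bool.false_eq_true, if_false]; exact ih ts cur

theorem pvToks_words : ∀ (t : List Char) (cur : List Char),
    pvToks cur t = pvWords cur (pvMid t) := by
  intro t
  induction t with
  | nil => intro cur; simp [pvToks, pvMid, pvWords]
  | cons c t ih =>
    intro cur
    simp only [pvToks, pvMid, List.map_cons, List.filter_cons]
    by_cases h1 : PySem.Chars.isalnum c = true
    · have hne : ¬(c = '/' ∨ c = '\\' ∨ c = ' ' ∨ c = '\t') := by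
        rintro (rfl | rfl | rfl | rfl) <;> exact absurd h1 (by decide)
      have hf4 : pvF4 c = c := by simp [pvF4, hne]
      have hk : pvKeep c = true := by simp [pvKeep, h1]
      have hcu : c ≠ '_' := by rintro rfl; exact absurd h1 (by decide)
      rw [hf4, hk]
      simp only [h1, if_true, pvWords, if_neg hcu]
      exact ih (cur ++ [c])
    · simp only [h1, Bool.false_eq_true, if_false]
      by_cases h2 : (['/', '\\', ' ', '\t', '_'] : List Char).contains c = true
      · have hf4 : pvF4 c = '_' := by
          have hm : c = '/' ∨ c = '\\' ∨ c = ' ' ∨ c = '\t' ∨ c = '_' := by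
            simpa using h2
          rcases hm with rfl | rfl | rfl | rfl | rfl <;> rfl
        have hk : pvKeep '_' = true := by decide
        rw [h2, hf4, hk]
        simp only [if_true, pvWords, if_pos rfl]
        by_cases h3 : cur = []
        · simp only [h3, if_true]; exact ih []
        · simp only [if_neg h3]; rw [ih []]; rfl
      · rw [Bool.not_eq_true] at h2
        have hne : ¬(c = '/' ∨ c = '\\' ∨ c = ' ' ∨ c = '\t' ∨ c = '_') := by
          simpa using h2
        have hf4 : pvF4 c = c := by
          simp only [pvF4]
          rw [if_neg (by tauto)]
        have hk : pvKeep c = false := by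
          simp only [pvKeep, h1, Bool.false_or, beq_eq_false_iff_ne, ne_eq]
          tauto
        rw [h2, hf4, hk]
        simp only [Bool.false_eq_true, if_false]
        exact ih cur

theorem pvSqueeze_cons_ne (a : Char) (ha : a ≠ '_') (X : List Char) :
    pvSqueeze (a :: X) = a :: pvSqueeze X := by
  match X with
  | [] => rfl
  | b :: t => simp only [pvSqueeze, if_neg (by tauto : ¬(a = '_' ∧ b = '_'))]

theorem pvSqueeze_uu (t : List Char) : pvSqueeze ('_' :: '_' :: t) = pvSqueeze ('_' :: t) := by
  simp [pvSqueeze]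

theorem pvSqueeze_cons_cons_ne (a b : Char) (hab : ¬(a = '_' ∧ b = '_')) (t : List Char) :
    pvSqueeze (a :: b :: t) = a :: pvSqueeze (b :: t) := by
  simp only [pvSqueeze, if_neg hab]

mutual
theorem pvSqR1_fst : ∀ (cs : List Char), pvSqueeze (pvR1 cs) = pvSqueeze cs
  | [] => by simp [pvR1]
  | [a] => by simp [pvR1]
  | a :: b :: t => by
    by_cases hab : a = '_' ∧ b = '_'
    · obtain ⟨ha, hb⟩ := hab
      subst ha; subst hb
      rw [show pvR1 ('_' :: '_' :: t) = '_' :: pvR1 t from by simp [pvR1]]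
      rw [pvSqueeze_uu]
      exact pvSqR1_snd t '_'
    · rw [show pvR1 (a :: b :: t) = a :: pvR1 (b :: t) from by simp [pvR1, hab]]
      obtain ⟨Y, hY⟩ := pvR1_head b t
      rw [hY, pvSqueeze_cons_cons_ne a b hab, pvSqueeze_cons_cons_ne a b hab, ← hY,
        pvSqR1_fst (b :: t)]
termination_by cs => 2 * cs.length
decreasing_by all_goals (simp only [List.length_cons]; omega)

theorem pvSqR1_snd : ∀ (cs : List Char) (c : Char), pvSqueeze (c :: pvR1 cs) = pvSqueeze (c :: cs)
  | [], _ => rfl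
  | a :: t, c => by
    obtain ⟨Y, hY⟩ := pvR1_head a t
    rw [hY]
    by_cases hca : c = '_' ∧ a = '_'
    · rw [show pvSqueeze (c :: a :: Y) = pvSqueeze (a :: Y) from by simp only [pvSqueeze, if_pos hca]]
      rw [show pvSqueeze (c :: a :: t) = pvSqueeze (a :: t) from by simp only [pvSqueeze, if_pos hca]]
      rw [← hY]
      exact pvSqR1_fst (a :: t)
    · rw [pvSqueeze_cons_cons_ne c a hca, pvSqueeze_cons_cons_ne c a hca, ← hY,
        pvSqR1_fst (a :: t)]
termination_by cs _ => 2 * cs.length + 1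
decreasing_by all_goals (simp only [List.length_cons]; omega)
end

theorem pvNoAdj : ∀ (cs : List Char), ¬ ['_', '_'] <:+: cs → pvSqueeze cs = cs
  | [], _ => rfl
  | [a], _ => rfl
  | a :: b :: t, h => by
    have hab : ¬(a = '_' ∧ b = '_') := by
      rintro ⟨rfl, rfl⟩
      exact h ⟨[], t, by simp⟩
    have ht : ¬ ['_', '_'] <:+: (b :: t) := by
      rintro ⟨p, q, hp⟩
      exact h ⟨a :: p, q, by rw [← hp]; simp⟩
    rw [pvSqueeze_cons_cons_ne a b hab, pvNoAdj (b :: t) ht]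

theorem pvALoop_eq (cs : List Char) : pvALoop cs = pvSqueeze cs := by
  induction cs using pvALoop.induct with
  | case1 cs h ih =>
    rw [pvALoop, if_pos h, ih, pvReplace_underscore, pvSqR1_fst]
  | case2 cs h =>
    rw [pvALoop, if_neg h]
    exact (pvNoAdj cs (fun hi => h ((pvIsIn_underscore cs).mpr hi))).symm

theorem pvRst_cons_ne (c : Char) (hc : c ≠ '_') (X : List Char) : pvRst (c :: X) = c :: pvRst X := by
  simp only [pvRst, List.reverse_cons, List.dropWhile_append]
  split
  · rename_i hemp
    have h0 : X.reverse.dropWhile (['_'].contains ·) = [] := by simpa using hemp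
    rw [h0]
    simp [List.dropWhile, hc]
  · simp

theorem pvRst_cons_us (X : List Char) :
    pvRst ('_' :: X) = if pvRst X = [] then [] else '_' :: pvRst X := by
  simp only [pvRst, List.reverse_cons, List.dropWhile_append]
  split
  · rename_i hemp
    have h0 : X.reverse.dropWhile (['_'].contains ·) = [] := by simpa using hemp
    rw [h0]
    simp [List.dropWhile]
  · rename_i hemp
    have hne : X.reverse.dropWhile (['_'].contains ·) ≠ [] := by simpa using hemp
    rw [if_neg (by simpa using hne)]
    simp

theorem pvStrip_eq_rst_drop (X : List Char) :
    PySem.Chars.stripChars X ['_'] = pvRst (X.dropWhile (['_'].contains ·)) := by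
  simp [PySem.Chars.stripChars, pvRst]

theorem pvStrip_cons_us (X : List Char) :
    PySem.Chars.stripChars ('_' :: X) ['_'] = PySem.Chars.stripChars X ['_'] := by
  rw [pvStrip_eq_rst_drop, pvStrip_eq_rst_drop]
  have h0 : List.dropWhile (['_'].contains ·) ('_' :: X) = List.dropWhile (['_'].contains ·) X := by
    simp [List.dropWhile]
  rw [h0]

theorem pvStrip_cons_ne (c : Char) (hc : c ≠ '_') (X : List Char) :
    PySem.Chars.stripChars (c :: X) ['_'] = c :: pvRst X := by
  rw [pvStrip_eq_rst_drop]
  rw [show List.dropWhile (['_'].contains ·) (c :: X) = c :: X from by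
    simp [List.dropWhile, hc]]
  exact pvRst_cons_ne c hc X

theorem pvWords_ne : ∀ (t cur : List Char), cur ≠ [] → pvWords cur t ≠ [] := by
  intro t
  induction t with
  | nil => intro cur h; simp [pvWords, h]
  | cons c t ih =>
    intro cur h
    simp only [pvWords]
    by_cases hc : c = '_'
    · simp only [if_pos hc, if_neg h]
      exact List.cons_ne_nil _ _
    · simp only [if_neg hc]
      exact ih (cur ++ [c]) (by simp)

theorem pvJoin_cons (cur : List Char) (W : List (List Char)) (hW : W ≠ []) :
    PySem.Chars.join ['_'] (cur :: W) = cur ++ '_' :: PySem.Chars.join ['_'] W := by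
  match W with
  | b :: l =>
    rw [PySem.Chars.join_cons_cons]
    simp

theorem pvWords_us (cur t : List Char) (h : cur ≠ []) :
    pvWords cur ('_' :: t) = cur :: pvWords [] t := by
  simp [pvWords, h]

theorem pvWords_us_nil (t : List Char) : pvWords [] ('_' :: t) = pvWords [] t := by
  simp [pvWords]

theorem pvWords_cons_ne (cur t : List Char) (c : Char) (hc : c ≠ '_') :
    pvWords cur (c :: t) = pvWords (cur ++ [c]) t := by
  simp [pvWords, hc]

theorem pvM2 : ∀ (m cur : List Char), cur ≠ [] →
    PySem.Chars.join ['_'] (pvWords cur m) = cur ++ pvRst (pvSqueeze m)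
  | [], cur, hcur => by
    simp only [pvWords, if_neg hcur, PySem.Chars.join_singleton]
    rw [show pvSqueeze [] = [] from rfl, show pvRst [] = [] from rfl]
    simp
  | c :: t, cur, hcur => by
    by_cases hc : c = '_'
    · subst hc
      rw [pvWords_us cur t hcur]
      match t with
      | [] =>
        rw [show pvWords [] ([] : List Char) = [] from rfl]
        rw [PySem.Chars.join_singleton]
        rw [show pvSqueeze ['_'] = ['_'] from rfl]
        rw [show pvRst ['_'] = [] from by simp [pvRst, List.dropWhile]]
        simp
      | c2 :: t3 =>
        by_cases hc2 : c2 = '_'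
        · subst hc2
          rw [pvWords_us_nil, ← pvWords_us cur t3 hcur]
          rw [pvM2 ('_' :: t3) cur hcur]
          rw [pvSqueeze_uu]
        · rw [pvWords_cons_ne [] t3 c2 hc2]
          rw [pvJoin_cons cur _ (pvWords_ne t3 ([] ++ [c2]) (by simp))]
          rw [pvM2 t3 ([] ++ [c2]) (by simp)]
          rw [pvSqueeze_cons_cons_ne '_' c2 (by tauto)]
          rw [pvSqueeze_cons_ne c2 hc2]
          rw [pvRst_cons_us, pvRst_cons_ne c2 hc2]
          rw [if_neg (List.cons_ne_nil _ _)]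
          simp
    · rw [pvWords_cons_ne cur t c hc]
      rw [pvM2 t (cur ++ [c]) (by simp)]
      rw [pvSqueeze_cons_ne c hc, pvRst_cons_ne c hc]
      simp
termination_by m _ _ => m.length
decreasing_by all_goals (simp only [List.length_cons]; omega)

theorem pvM : ∀ (m : List Char),
    PySem.Chars.stripChars (pvSqueeze m) ['_'] = PySem.Chars.join ['_'] (pvWords [] m)
  | [] => by
    rw [show pvSqueeze [] = [] from rfl, show pvWords [] ([] : List Char) = [] from rfl]
    rw [PySem.Chars.join_nil]
    simp [PySem.Chars.stripChars]
  | c :: t => by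
    by_cases hc : c = '_'
    · subst hc
      rw [pvWords_us_nil]
      match t with
      | [] =>
        rw [show pvSqueeze ['_'] = ['_'] from rfl]
        rw [pvStrip_cons_us]
        rw [show pvWords [] ([] : List Char) = [] from rfl, PySem.Chars.join_nil]
        simp [PySem.Chars.stripChars]
      | c2 :: t3 =>
        by_cases hc2 : c2 = '_'
        · subst hc2
          rw [pvSqueeze_uu]
          rw [pvM ('_' :: t3)]
        · rw [pvSqueeze_cons_cons_ne '_' c2 (by tauto)]
          rw [pvStrip_cons_us]
          rw [pvM (c2 :: t3)]
    · rw [pvSqueeze_cons_ne c hc, pvStrip_cons_ne c hc]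
      rw [pvWords_cons_ne [] t c hc]
      rw [pvM2 t ([] ++ [c]) (by simp)]
      simp
termination_by m => m.length
decreasing_by all_goals (simp only [List.length_cons]; omega)

theorem pvG_comp (x : Char) : pvG '\t' (pvG ' ' (pvG '\\' (pvG '/' x))) = pvF4 x := by
  by_cases h1 : x = '/'
  · subst h1; decide
  by_cases h2 : x = '\\'
  · subst h2; decide
  by_cases h3 : x = ' '
  · subst h3; decide
  by_cases h4 : x = '\t'
  · subst h4; decide
  simp [pvG, pvF4, h1, h2, h3, h4]

theorem pvMapF4 (u : List Char) :
    (((u.map (pvG '/')).map (pvG '\\')).map (pvG ' ')).map (pvG '\t') = u.map pvF4 := by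
  induction u with
  | nil => rfl
  | cons x u ih => simp only [List.map_cons, ih, pvG_comp]

theorem pvA_eq (name : String) : sanitize_station_name name
    = String.ofList (PySem.Chars.stripChars (pvSqueeze (pvMid (PySem.Str.upper name).toList)) ['_']) := by
  unfold sanitize_station_name
  simp only [List.foldl_cons, List.foldl_nil, PySem.Str.toList_replace, PySem.Str.stripChars,
    String.toList_ofList]
  rw [show ("/" : String).toList = ['/'] from rfl, show ("\\" : String).toList = ['\\'] from rfl,
     show (" " : String).toList = [' '] from rfl, show ("\t" : String).toList = ['\t'] from rfl,
     show ("_" : String).toList = ['_'] from rfl]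
  rw [pvReplace_single, pvReplace_single, pvReplace_single, pvReplace_single, pvMapF4]
  rw [pvALoop_eq]
  rfl

theorem pvB_eq (name : String) : sanitize_station_name_alt name
    = String.ofList (PySem.Chars.join ['_']
        (pvFin ((PySem.Str.upper name).toList.foldl pvStep ([], [])))) := rfl

-- ===== VERDICT (by name: the statement is the Claim_ definition above) =====
theorem sanitize_station_name_spec : Claim_equal_sanitize_station_name := by
  intro name _
  show sanitize_station_name name = sanitize_station_name_alt name
  rw [pvA_eq, pvB_eq, pvFoldB _ [] [], pvToks_words, List.nil_append, pvM]
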